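-- pv_equiv track=rewrite | github.com/arlegotin/eml-symbolic-regression | src/eml_symbolic_regression/campaign.py | _limitations_section
-- ===== SOURCE A (Python) =====
-- from typing import Any, Mapping
--
-- def _is_same_ast_return(run: Mapping[str, Any]) -> bool:
--     values = {str(run.get("classification") or ""), str(run.get("evidence_class") or ""), str(run.get("return_kind") or "")}
--     return bool(values & {"same_ast", "same_ast_return", "same_ast_warm_start_return"})
--
-- def _is_verified_equivalent_return(run: Mapping[str, Any]) -> bool:
--     values = {str(run.get("classification") or ""), str(run.get("evidence_class") or ""), str(run.get("return_kind") or "")}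
--     return bool(values & {"verified_equivalent", "verified_equivalent_ast", "verified_equivalent_warm_start_recovery"})
--
-- def _limitations_section(runs: list[Mapping[str, Any]]) -> str:
--     blind_total = sum(1 for run in runs if run.get("start_mode") == "blind")
--     blind_recovered = sum(
--         1 for run in runs if run.get("start_mode") == "blind" and run.get("claim_status") == "recovered"
--     )
--     blind_pure_recovered = sum(
--         1 for run in runs if run.get("start_mode") == "blind" and run.get("evidence_class") == "blind_training_recovered"
--     )
--     blind_scaffolded_recovered = sum(
--         1
--         for run in runs
--         if run.get("start_mode") == "blind" and run.get("evidence_class") == "scaffolded_blind_training_recovered"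
--     )
--     same_ast = sum(1 for run in runs if _is_same_ast_return(run))
--     equivalent = sum(1 for run in runs if _is_verified_equivalent_return(run))
--     unsupported = sum(1 for run in runs if run.get("classification") == "unsupported")
--     failed = sum(1 for run in runs if run.get("classification") in {"failed", "snapped_but_failed", "soft_fit_only", "execution_failure"})
--     blind_note = ""
--     if blind_total:
--         blind_note = (
--             f" This campaign records {blind_scaffolded_recovered} scaffolded blind recoveries and "
--             f"{blind_pure_recovered} pure random-initialized blind recoveries; compare declared pure-blind proof suites separately."
--         )
--     return "\n".join(
--         [
--             f"- Blind training recovery: {blind_recovered}/{blind_total} blind runs recovered.{blind_note}",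
--             f"- Same-AST exact return: {same_ast} runs snapped back to the compiled seed or exact target; useful basin evidence, not discovery.",
--             f"- Verified-equivalent exact return: {equivalent} runs snapped to a different exact AST that verified.",
--             f"- Unsupported gates: {unsupported} runs were blocked by compiler/depth/operator limits and remain in the denominator.",
--             f"- Failed fits: {failed} runs did not pass verifier-owned recovery after training or execution.",
--         ]
--     )
-- ===== SOURCE B (Python) =====
-- def _limitations_section(runs):
--     SAME = {"same_ast", "same_ast_return", "same_ast_warm_start_return"}
--     EQUIV = {"verified_equivalent", "verified_equivalent_ast", "verified_equivalent_warm_start_recovery"}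
--     FAIL = {"failed", "snapped_but_failed", "soft_fit_only", "execution_failure"}
--     blind_total = blind_recovered = blind_pure = blind_scaf = 0
--     same_ast = equivalent = unsupported = failed = 0
--     for run in runs:
--         c = str(run.get("classification") or "")
--         e = str(run.get("evidence_class") or "")
--         r = str(run.get("return_kind") or "")
--         blind = run.get("start_mode") == "blind"
--         if blind:
--             blind_total += 1
--         if blind and run.get("claim_status") == "recovered":
--             blind_recovered += 1
--         if blind and run.get("evidence_class") == "blind_training_recovered":
--             blind_pure += 1
--         if blind and run.get("evidence_class") == "scaffolded_blind_training_recovered":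
--             blind_scaf += 1
--         if c in SAME or e in SAME or r in SAME:
--             same_ast += 1
--         if c in EQUIV or e in EQUIV or r in EQUIV:
--             equivalent += 1
--         if run.get("classification") == "unsupported":
--             unsupported += 1
--         if c in FAIL:
--             failed += 1
--     blind_note = ""
--     if blind_total:
--         blind_note = (
--             f" This campaign records {blind_scaf} scaffolded blind recoveries and "
--             f"{blind_pure} pure random-initialized blind recoveries; compare declared pure-blind proof suites separately."
--         )
--     return "\n".join(
--         [
--             f"- Blind training recovery: {blind_recovered}/{blind_total} blind runs recovered.{blind_note}",
--             f"- Same-AST exact return: {same_ast} runs snapped back to the compiled seed or exact target; useful basin evidence, not discovery.",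
--             f"- Verified-equivalent exact return: {equivalent} runs snapped to a different exact AST that verified.",
--             f"- Unsupported gates: {unsupported} runs were blocked by compiler/depth/operator limits and remain in the denominator.",
--             f"- Failed fits: {failed} runs did not pass verifier-owned recovery after training or execution.",
--         ]
--     )
-- ===== Notes on version B (the rewrite author's own statement) =====
-- stated objective: simpler
-- what changed: Replaces A's eight separate generator-sum passes over runs (plus per-run set construction and set intersection) by one loop that evaluates each run's fields once and increments eight counters, with the set-intersection truthiness inlined as three membership tests; the report text is built identically.
import Mathlib
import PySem

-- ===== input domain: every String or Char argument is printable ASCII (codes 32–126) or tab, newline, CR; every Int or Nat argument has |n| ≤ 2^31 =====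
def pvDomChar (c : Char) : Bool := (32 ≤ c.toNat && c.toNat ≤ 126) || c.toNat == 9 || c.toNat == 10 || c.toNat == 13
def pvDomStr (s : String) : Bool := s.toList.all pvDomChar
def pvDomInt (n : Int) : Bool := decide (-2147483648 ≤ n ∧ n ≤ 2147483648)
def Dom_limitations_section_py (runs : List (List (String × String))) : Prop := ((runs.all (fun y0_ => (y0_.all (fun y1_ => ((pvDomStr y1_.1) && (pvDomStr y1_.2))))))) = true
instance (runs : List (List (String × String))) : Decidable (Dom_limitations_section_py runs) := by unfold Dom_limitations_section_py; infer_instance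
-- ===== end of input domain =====

-- B replaces A's eight separate passes over `runs` by one loop holding eight counters (objective: simpler single pass; same output text).

-- shared primitive: run.get(k) on a Mapping modelled as an association list (first match)
def runGet (run : List (String × String)) (k : String) : Option String :=
  (run.find? (fun p => p.1 == k)).map (fun p => p.2)

-- str(x or "") where x : Optional[str]
def coerceStr (o : Option String) : String := o.getD ""

-- ===== PORT A =====
def isSameAstReturn (run : List (String × String)) : Bool :=
  let values : PySem.Set String := PySem.Set.ofList
    [coerceStr (runGet run "classification"), coerceStr (runGet run "evidence_class"),
     coerceStr (runGet run "return_kind")]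
  !(PySem.Set.inter values
      (PySem.Set.ofList ["same_ast", "same_ast_return", "same_ast_warm_start_return"])).isEmpty

def isVerifiedEquivalentReturn (run : List (String × String)) : Bool :=
  let values : PySem.Set String := PySem.Set.ofList
    [coerceStr (runGet run "classification"), coerceStr (runGet run "evidence_class"),
     coerceStr (runGet run "return_kind")]
  !(PySem.Set.inter values
      (PySem.Set.ofList ["verified_equivalent", "verified_equivalent_ast",
        "verified_equivalent_warm_start_recovery"])).isEmpty

def limitations_section_py (runs : List (List (String × String))) : String :=
  let blind_total := runs.countP (fun run => runGet run "start_mode" == some "blind")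
  let blind_recovered := runs.countP (fun run =>
    runGet run "start_mode" == some "blind" && runGet run "claim_status" == some "recovered")
  let blind_pure_recovered := runs.countP (fun run =>
    runGet run "start_mode" == some "blind" &&
      runGet run "evidence_class" == some "blind_training_recovered")
  let blind_scaffolded_recovered := runs.countP (fun run =>
    runGet run "start_mode" == some "blind" &&
      runGet run "evidence_class" == some "scaffolded_blind_training_recovered")
  let same_ast := runs.countP isSameAstReturn
  let equivalent := runs.countP isVerifiedEquivalentReturn
  let unsupported := runs.countP (fun run => runGet run "classification" == some "unsupported")
  let failed := runs.countP (fun run =>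
    [some "failed", some "snapped_but_failed", some "soft_fit_only",
      some "execution_failure"].contains (runGet run "classification"))
  let blind_note :=
    if blind_total ≠ 0 then
      " This campaign records " ++ PySem.Int.toStr (Int.ofNat blind_scaffolded_recovered) ++
        " scaffolded blind recoveries and " ++ PySem.Int.toStr (Int.ofNat blind_pure_recovered) ++
        " pure random-initialized blind recoveries; compare declared pure-blind proof suites separately."
    else ""
  String.intercalate "\n"
    [ "- Blind training recovery: " ++ PySem.Int.toStr (Int.ofNat blind_recovered) ++ "/" ++
        PySem.Int.toStr (Int.ofNat blind_total) ++ " blind runs recovered." ++ blind_note,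
      "- Same-AST exact return: " ++ PySem.Int.toStr (Int.ofNat same_ast) ++
        " runs snapped back to the compiled seed or exact target; useful basin evidence, not discovery.",
      "- Verified-equivalent exact return: " ++ PySem.Int.toStr (Int.ofNat equivalent) ++
        " runs snapped to a different exact AST that verified.",
      "- Unsupported gates: " ++ PySem.Int.toStr (Int.ofNat unsupported) ++
        " runs were blocked by compiler/depth/operator limits and remain in the denominator.",
      "- Failed fits: " ++ PySem.Int.toStr (Int.ofNat failed) ++
        " runs did not pass verifier-owned recovery after training or execution." ]

-- ===== PORT B =====
def sameKinds : List String := ["same_ast", "same_ast_return", "same_ast_warm_start_return"]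
def equivKinds : List String :=
  ["verified_equivalent", "verified_equivalent_ast", "verified_equivalent_warm_start_recovery"]
def failKinds : List String := ["failed", "snapped_but_failed", "soft_fit_only", "execution_failure"]

-- one iteration of B's single loop over runs: eight counters updated in place
def stepB (s : Nat × Nat × Nat × Nat × Nat × Nat × Nat × Nat) (run : List (String × String)) :
    Nat × Nat × Nat × Nat × Nat × Nat × Nat × Nat :=
  let c := coerceStr (runGet run "classification")
  let e := coerceStr (runGet run "evidence_class")
  let r := coerceStr (runGet run "return_kind")
  let blind := runGet run "start_mode" == some "blind"
  (s.1 + (if blind then 1 else 0),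
   s.2.1 + (if blind && runGet run "claim_status" == some "recovered" then 1 else 0),
   s.2.2.1 + (if blind && runGet run "evidence_class" == some "blind_training_recovered" then 1 else 0),
   s.2.2.2.1 +
     (if blind && runGet run "evidence_class" == some "scaffolded_blind_training_recovered" then 1 else 0),
   s.2.2.2.2.1 + (if sameKinds.contains c || sameKinds.contains e || sameKinds.contains r then 1 else 0),
   s.2.2.2.2.2.1 + (if equivKinds.contains c || equivKinds.contains e || equivKinds.contains r then 1 else 0),
   s.2.2.2.2.2.2.1 + (if runGet run "classification" == some "unsupported" then 1 else 0),
   s.2.2.2.2.2.2.2 + (if failKinds.contains c then 1 else 0))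

def limitations_section_py_alt (runs : List (List (String × String))) : String :=
  let (bt, br, bp, bs, sa, eqv, un, fl) := runs.foldl stepB (0, 0, 0, 0, 0, 0, 0, 0)
  let blind_note :=
    if bt ≠ 0 then
      " This campaign records " ++ PySem.Int.toStr (Int.ofNat bs) ++
        " scaffolded blind recoveries and " ++ PySem.Int.toStr (Int.ofNat bp) ++
        " pure random-initialized blind recoveries; compare declared pure-blind proof suites separately."
    else ""
  String.intercalate "\n"
    [ "- Blind training recovery: " ++ PySem.Int.toStr (Int.ofNat br) ++ "/" ++
        PySem.Int.toStr (Int.ofNat bt) ++ " blind runs recovered." ++ blind_note,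
      "- Same-AST exact return: " ++ PySem.Int.toStr (Int.ofNat sa) ++
        " runs snapped back to the compiled seed or exact target; useful basin evidence, not discovery.",
      "- Verified-equivalent exact return: " ++ PySem.Int.toStr (Int.ofNat eqv) ++
        " runs snapped to a different exact AST that verified.",
      "- Unsupported gates: " ++ PySem.Int.toStr (Int.ofNat un) ++
        " runs were blocked by compiler/depth/operator limits and remain in the denominator.",
      "- Failed fits: " ++ PySem.Int.toStr (Int.ofNat fl) ++
        " runs did not pass verifier-owned recovery after training or execution." ]

-- ===== PRECONDITION & SPEC =====
def Spec_limitations_section_py (runs : List (List (String × String))) (out : String) : Prop := out = limitations_section_py_alt runs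
instance (runs : List (List (String × String))) (out : String) : Decidable (Spec_limitations_section_py runs out) := by unfold Spec_limitations_section_py; infer_instance

-- ===== CLAIM (what is proved, stated in full; the proofs are below) =====
def Claim_equal_limitations_section_py : Prop := ∀ (runs : List (List (String × String))), Dom_limitations_section_py runs → Spec_limitations_section_py runs (limitations_section_py runs)

-- ===== LEMMAS AND PROOFS =====

-- truthiness of a 3-element set intersected with a literal set = any of the three members
theorem interNE (a b c : String) (t : List String) :
    (!(PySem.Set.inter (PySem.Set.ofList [a, b, c]) (PySem.Set.ofList t)).isEmpty) =
      (t.contains a || t.contains b || t.contains c) := by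
  rw [Bool.eq_iff_iff]
  simp [List.eq_nil_iff_forall_not_mem, PySem.Set.mem_inter,
    PySem.Set.mem_ofList]
  tauto

theorem sameAst_eq (run : List (String × String)) :
    isSameAstReturn run =
      (sameKinds.contains (coerceStr (runGet run "classification")) ||
       sameKinds.contains (coerceStr (runGet run "evidence_class")) ||
       sameKinds.contains (coerceStr (runGet run "return_kind"))) := by
  simp only [isSameAstReturn, sameKinds]
  exact interNE _ _ _ _

theorem equiv_eq (run : List (String × String)) :
    isVerifiedEquivalentReturn run =
      (equivKinds.contains (coerceStr (runGet run "classification")) ||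
       equivKinds.contains (coerceStr (runGet run "evidence_class")) ||
       equivKinds.contains (coerceStr (runGet run "return_kind"))) := by
  simp only [isVerifiedEquivalentReturn, equivKinds]
  exact interNE _ _ _ _

theorem failed_eq (run : List (String × String)) :
    (failKinds.contains (coerceStr (runGet run "classification"))) =
      ([some "failed", some "snapped_but_failed", some "soft_fit_only",
        some "execution_failure"].contains (runGet run "classification")) := by
  cases h : runGet run "classification" with
  | none => simp [failKinds, coerceStr]
  | some v => simp [failKinds, coerceStr, List.contains_eq_mem]

-- B's single loop computes the same eight counts as A's eight countP passes
theorem foldB_eq (runs : List (List (String × String)))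
    (s : Nat × Nat × Nat × Nat × Nat × Nat × Nat × Nat) :
    runs.foldl stepB s =
      (s.1 + runs.countP (fun run => runGet run "start_mode" == some "blind"),
       s.2.1 + runs.countP (fun run =>
         runGet run "start_mode" == some "blind" && runGet run "claim_status" == some "recovered"),
       s.2.2.1 + runs.countP (fun run =>
         runGet run "start_mode" == some "blind" &&
           runGet run "evidence_class" == some "blind_training_recovered"),
       s.2.2.2.1 + runs.countP (fun run =>
         runGet run "start_mode" == some "blind" &&
           runGet run "evidence_class" == some "scaffolded_blind_training_recovered"),
       s.2.2.2.2.1 + runs.countP isSameAstReturn,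
       s.2.2.2.2.2.1 + runs.countP isVerifiedEquivalentReturn,
       s.2.2.2.2.2.2.1 + runs.countP (fun run => runGet run "classification" == some "unsupported"),
       s.2.2.2.2.2.2.2 + runs.countP (fun run =>
         [some "failed", some "snapped_but_failed", some "soft_fit_only",
           some "execution_failure"].contains (runGet run "classification"))) := by
  induction runs generalizing s with
  | nil => simp
  | cons r rs ih =>
    simp only [List.foldl_cons, ih, List.countP_cons, stepB, sameAst_eq, equiv_eq, failed_eq,
      Prod.mk.injEq]
    omega

theorem limitations_section_py_spec : Claim_equal_limitations_section_py := by
  intro runs _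
  show _ = _
  unfold limitations_section_py limitations_section_py_alt
  rw [foldB_eq]
  simp
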